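-- pv_equiv track=rewrite | github.com/Amimer12/TP1-SSAD | django_Projet/appTP1/steganography_methods.py | steg_colonne
-- ===== SOURCE A (Python) =====
-- import math
-- import math
--
-- def steg_colonne(secret, text, nb_colonnes):
--     mots = text.split()
--     error_message =""
--     if len(mots) < len(secret):
--         error_message = (F"it's impossible to hide your message in this text cause it contains less words than the length of your message, insert more words or shorter message !")
--
--     nb_lignes = math.ceil(len(mots) / nb_colonnes)
--     tableau = text_to_tab(mots, nb_colonnes, nb_lignes)
--     index_message = 0
--     zero_width_space = '\u200B'
--     for j in range(nb_colonnes):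
--         for i in range(nb_lignes):
--             if index_message < len(secret) and tableau[i][j]:
--                 tableau[i][j] = secret[index_message] + zero_width_space + tableau[i][j][1:]
--                 index_message += 1
--
--     texte_cache = " ".join(" ".join(ligne) for ligne in tableau)
--     return texte_cache.strip(),error_message
--
-- def text_to_tab(mots, nb_colonnes, nb_lignes):
--     tableau = [["" for _ in range(nb_colonnes)] for _ in range(nb_lignes)]
--     index = 0
--     for i in range(nb_lignes):
--         for j in range(nb_colonnes):
--             if index < len(mots):
--                 tableau[i][j] = mots[index]
--                 index += 1
--     return tableau
-- ===== SOURCE B (Python) =====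
-- import math
--
-- def steg_colonne(secret, text, nb_colonnes):
--     mots = text.split()
--     n = len(mots)
--     error_message = ""
--     if n < len(secret):
--         error_message = (F"it's impossible to hide your message in this text cause it contains less words than the length of your message, insert more words or shorter message !")
--     nb_lignes = math.ceil(n / nb_colonnes)
--     if nb_lignes <= 0:
--         # the grid has no rows, so no text is emitted
--         return "", error_message
--     # column-major order of the indices of the cells that hold a word
--     # columns past min(nb_colonnes, n) cannot hold any word
--     order = [i * nb_colonnes + j
--              for j in range(min(nb_colonnes, n))
--              for i in range(nb_lignes)
--              if i * nb_colonnes + j < n]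
--     for k, idx in enumerate(order[:len(secret)]):
--         mots[idx] = secret[k] + '\u200B' + mots[idx][1:]
--     return " ".join(mots).strip(), error_message
-- ===== Notes on version B (the rewrite author's own statement) =====
-- stated objective: simpler
-- what changed: B drops the 2D table entirely: it computes the column-major list of valid word indices with one arithmetic comprehension (over the at most min(nb_colonnes, n) non-empty columns) and embeds the secret directly into the flat word list, instead of building a padded row-major grid, mutating its cells in a nested column scan, and re-joining its rows.
import Mathlib
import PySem

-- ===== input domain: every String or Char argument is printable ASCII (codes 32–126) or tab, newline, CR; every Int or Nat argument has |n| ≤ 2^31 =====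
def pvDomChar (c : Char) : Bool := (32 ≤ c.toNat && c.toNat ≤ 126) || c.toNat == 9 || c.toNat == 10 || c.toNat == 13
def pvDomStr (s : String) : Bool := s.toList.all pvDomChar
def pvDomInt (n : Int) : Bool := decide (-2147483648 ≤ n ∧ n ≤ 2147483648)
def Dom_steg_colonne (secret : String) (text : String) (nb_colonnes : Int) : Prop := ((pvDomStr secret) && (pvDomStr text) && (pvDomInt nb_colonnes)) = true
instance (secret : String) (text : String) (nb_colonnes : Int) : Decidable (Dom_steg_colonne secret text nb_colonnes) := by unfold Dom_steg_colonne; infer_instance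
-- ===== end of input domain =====

-- B replaces A's padded 2D table and nested in-place column scans by one arithmetic
-- column-major index list over the flat word list (objective: simpler, same cost).

def pvErr : String := "it's impossible to hide your message in this text cause it contains less words than the length of your message, insert more words or shorter message !"

-- ===== PORT A =====
def pvSet2 (tab : List (List (List Char))) (i j : Int) (v : List Char) : List (List (List Char)) :=
  tab.set i.toNat ((PySem.List.pyGetD tab i []).set j.toNat v)
def pvSet1 (xs : List (List Char)) (i : Int) (v : List Char) : List (List Char) :=
  xs.set i.toNat v
def text_to_tab (mots : List (List Char)) (nb_colonnes : Int) (nb_lignes : Int) :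
    List (List (List Char)) :=
  let tableau := List.replicate nb_lignes.toNat (List.replicate nb_colonnes.toNat ([] : List Char))
  let st := (PySem.List.pyRange 0 nb_lignes 1).foldl (fun st i =>
      (PySem.List.pyRange 0 nb_colonnes 1).foldl (fun st j =>
        if st.2 < (mots.length : Int) then
          (pvSet2 st.1 i j (PySem.List.pyGetD mots st.2 []), st.2 + 1)
        else st) st) (tableau, (0 : Int))
  st.1
def steg_colonne (secret : String) (text : String) (nb_colonnes : Int) : String × String :=
  let mots := PySem.Chars.split₀ text.toList
  let error_message := if mots.length < secret.toList.length then pvErr else ""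
  let nb_lignes : Int := -(PySem.Int.floordiv (-(mots.length : Int)) nb_colonnes)
  let tableau := text_to_tab mots nb_colonnes nb_lignes
  let st := (PySem.List.pyRange 0 nb_colonnes 1).foldl (fun st j =>
      (PySem.List.pyRange 0 nb_lignes 1).foldl (fun st i =>
        if st.2 < (secret.toList.length : Int) ∧
            PySem.List.pyGetD (PySem.List.pyGetD st.1 i []) j [] ≠ [] then
          (pvSet2 st.1 i j
            (PySem.List.pyGetD secret.toList st.2 ' ' :: '\u200B' ::
              PySem.List.slice (PySem.List.pyGetD (PySem.List.pyGetD st.1 i []) j []) (some 1) none),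
           st.2 + 1)
        else st) st) (tableau, (0 : Int))
  let texte_cache := PySem.Chars.strip
    (PySem.Chars.join [' '] (st.1.map (fun ligne => PySem.Chars.join [' '] ligne)))
  (String.ofList texte_cache, error_message)
def steg_colonne_alt (secret : String) (text : String) (nb_colonnes : Int) : String × String :=
  let mots := PySem.Chars.split₀ text.toList
  let n : Int := mots.length
  let error_message := if n < (secret.toList.length : Int) then pvErr else ""
  let nb_lignes : Int := -(PySem.Int.floordiv (-n) nb_colonnes)
  if nb_lignes ≤ 0 then ("", error_message) else
  -- columns past min(nb_colonnes, n) cannot hold any word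
  let order := (PySem.List.pyRange 0 (min nb_colonnes n) 1).flatMap (fun j =>
      ((PySem.List.pyRange 0 nb_lignes 1).map (fun i => i * nb_colonnes + j)).filter
        (fun idx => decide (idx < n)))
  let ws := (PySem.List.enumerate (PySem.List.slice order none (some (secret.toList.length : Int))) 0).foldl
      (fun ws p => pvSet1 ws p.2
        (PySem.List.pyGetD secret.toList p.1 ' ' :: '\u200B' ::
          PySem.List.slice (PySem.List.pyGetD ws p.2 []) (some 1) none)) mots
  (String.ofList (PySem.Chars.strip (PySem.Chars.join [' '] ws)), error_message)


-- ===== PRECONDITION & SPEC =====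
-- Python A raises ZeroDivisionError when nb_colonnes = 0 (math.ceil(len(mots) / 0)); nothing else raises.
def Pre_steg_colonne (secret : String) (text : String) (nb_colonnes : Int) : Prop :=
  nb_colonnes ≠ 0
instance (secret : String) (text : String) (nb_colonnes : Int) : Decidable (Pre_steg_colonne secret text nb_colonnes) := by unfold Pre_steg_colonne; infer_instance
def pvWitness_steg_colonne : String × String × Int := ("ab", "un mot cache", 2)

def Spec_steg_colonne (secret : String) (text : String) (nb_colonnes : Int) (out : String × String) : Prop := out = steg_colonne_alt secret text nb_colonnes
instance (secret : String) (text : String) (nb_colonnes : Int) (out : String × String) : Decidable (Spec_steg_colonne secret text nb_colonnes out) := by unfold Spec_steg_colonne; infer_instance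

-- ===== CLAIM (what is proved, stated in full; the proofs are below) =====
def Claim_equal_steg_colonne : Prop := ∀ (secret : String) (text : String) (nb_colonnes : Int), Dom_steg_colonne secret text nb_colonnes → Pre_steg_colonne secret text nb_colonnes → Spec_steg_colonne secret text nb_colonnes (steg_colonne secret text nb_colonnes)

-- ===== LEMMAS AND PROOFS =====
def pvGridOf (ws : List (List Char)) (Ln Cn : Nat) : List (List (List Char)) :=
  (List.range Ln).map (fun i => (List.range Cn).map (fun j => ws.getD (i*Cn+j) []))
def pvEmb (sec : List Char) (k : Int) (w : List Char) : List Char :=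
  PySem.List.pyGetD sec k ' ' :: '\u200B' :: PySem.List.slice w (some 1) none
def pvWStep (sec : List Char) (st : List (List Char) × Int) (t : Nat) : List (List Char) × Int :=
  if st.2 < (sec.length : Int) ∧ st.1.getD t [] ≠ [] then
    (st.1.set t (pvEmb sec st.2 (st.1.getD t [])), st.2 + 1)
  else st
def pvGStep (sec : List Char) (st : List (List (List Char)) × Int) (p : Nat × Nat) :
    List (List (List Char)) × Int :=
  if st.2 < (sec.length : Int) ∧
      PySem.List.pyGetD (PySem.List.pyGetD st.1 (p.1:Int) []) (p.2:Int) [] ≠ [] then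
    (pvSet2 st.1 (p.1:Int) (p.2:Int)
      (pvEmb sec st.2 (PySem.List.pyGetD (PySem.List.pyGetD st.1 (p.1:Int) []) (p.2:Int) [])), st.2+1)
  else st
def pvRun (sec : List Char) (V : List Nat) (k : Nat) (ws : List (List Char)) : List (List Char) :=
  match V with
  | [] => ws
  | t :: V' => pvRun sec V' (k+1) (ws.set t (pvEmb sec (k:Int) (ws.getD t [])))
def pvOrd (sec : List Char) (ms : List (List Char)) (Cn Ln : Nat) : List Nat :=
  (((List.range Cn).flatMap (fun j => (List.range Ln).map (fun i => i*Cn+j))).filter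
    (fun t => decide (t < ms.length))).take sec.length

def pvFill (ms : List (List Char)) (js : List Nat) (row : List (List Char)) (m : Nat) :
    List (List Char) × Nat :=
  match js with
  | [] => (row, m)
  | j :: js' => if m < ms.length then pvFill ms js' (row.set j (ms.getD m [])) (m+1) else (row, m)

def pvPartial (ms : List (List Char)) (Ln Cn l : Nat) : List (List (List Char)) :=
  (List.range Ln).map (fun i =>
    if i < l then (List.range Cn).map (fun j => ms.getD (i*Cn+j) []) else List.replicate Cn [])

-- L0: words of split() are nonempty
theorem pv_go_ne_nil (s : List Char) : ∀ (cur : List Char) (acc : List (List Char)),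
    (∀ w ∈ acc, w ≠ []) → ∀ w ∈ PySem.Chars.split₀.go s cur acc, w ≠ [] := by
  induction s with
  | nil =>
    intro cur acc hacc w hw
    simp only [PySem.Chars.split₀.go] at hw
    split at hw
    · exact hacc w (List.mem_reverse.mp hw)
    · rcases List.mem_cons.mp (List.mem_reverse.mp hw) with h | h
      · subst h
        intro hne
        rename_i hcur
        exact hcur (by simp [show cur = [] by simpa using hne])
      · exact hacc w h
  | cons c rest ih =>
    intro cur acc hacc w hw
    simp only [PySem.Chars.split₀.go] at hw
    split at hw
    · split at hw
      · exact ih _ _ hacc w hw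
      · refine ih _ _ ?_ w hw
        intro w' hw'
        rcases List.mem_cons.mp hw' with h | h
        · subst h
          intro hne
          rename_i _ hcur
          exact hcur (by simp [show cur = [] by simpa using hne])
        · exact hacc w' h
    · exact ih _ _ hacc w hw

theorem pv_split₀_ne_nil (s : List Char) : ∀ w ∈ PySem.Chars.split₀ s, w ≠ [] := by
  exact pv_go_ne_nil s [] [] (by simp)

-- L3 injectivity
theorem pv_idx_inj {Cn i j i' j' : Nat} (hj : j < Cn) (hj' : j' < Cn)
    (h : i*Cn+j = i'*Cn+j') : i = i' ∧ j = j' := by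
  rcases lt_trichotomy i i' with hlt | heq | hgt
  · exfalso
    have : (i+1)*Cn ≤ i'*Cn := Nat.mul_le_mul_right _ (by omega)
    nlinarith
  · subst heq; omega
  · exfalso
    have : (i'+1)*Cn ≤ i*Cn := Nat.mul_le_mul_right _ (by omega)
    nlinarith

-- L15 PAD
theorem pv_pad (ws : List (List Char)) (M : Nat) (h : ws.length ≤ M) :
    (List.range M).map (fun t => ws.getD t []) = ws ++ List.replicate (M - ws.length) [] := by
  apply List.ext_getElem
  · simp [h]
  · intro t h1 h2
    simp only [List.getElem_map, List.getElem_range]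
    by_cases ht : t < ws.length
    · rw [List.getD_eq_getElem _ _ ht, List.getElem_append_left ht]
    · rw [List.getD_eq_default _ _ (by omega), List.getElem_append_right (by omega)]
      simp

-- J1: join over an append of nonempty lists
theorem pv_join_append (sep : List Char) (xs ys : List (List Char)) (hx : xs ≠ []) (hy : ys ≠ []) :
    PySem.Chars.join sep (xs ++ ys) = PySem.Chars.join sep xs ++ sep ++ PySem.Chars.join sep ys := by
  induction xs with
  | nil => simp at hx
  | cons a xs ih =>
    rcases xs with _ | ⟨b, xs'⟩
    · rcases ys with _ | ⟨y, ys'⟩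
      · simp at hy
      · rw [List.singleton_append, PySem.Chars.join_cons_cons, PySem.Chars.join_singleton]
    · have hih := ih (by simp)
      simp only [List.cons_append] at hih ⊢
      rw [PySem.Chars.join_cons_cons, hih, PySem.Chars.join_cons_cons]
      simp [List.append_assoc]

-- JROWS
theorem pv_join_rows (sep : List Char) (rows : List (List (List Char)))
    (h : ∀ r ∈ rows, r ≠ []) :
    PySem.Chars.join sep (rows.map (PySem.Chars.join sep)) = PySem.Chars.join sep rows.flatten := by
  induction rows with
  | nil => simp [PySem.Chars.join_nil]
  | cons r rows ih =>
    rcases rows with _ | ⟨r2, rest⟩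
    · simp [PySem.Chars.join_singleton]
    · have h1 : r ≠ [] := h r (by simp)
      have h2 : PySem.Chars.join sep ((r2 :: rest).map (PySem.Chars.join sep)) =
          PySem.Chars.join sep (r2 :: rest).flatten := ih (fun r' hr' => h r' (by simp [hr']))
      simp only [List.map_cons] at h2 ⊢
      rw [PySem.Chars.join_cons_cons, h2]
      have hne : r2 ++ rest.flatten ≠ [] := by
        have : r2 ≠ [] := h r2 (by simp)
        simp only [ne_eq, List.append_eq_nil_iff]
        intro hr2
        exact this hr2.1
      rw [show (r :: r2 :: rest).flatten = r ++ (r2 ++ rest.flatten) by simp,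
        pv_join_append sep r (r2 ++ rest.flatten) h1 hne]
      simp [List.append_assoc]

-- J3: trailing empty words become trailing separators
theorem pv_join_pad (ws : List (List Char)) (p : Nat) (h : ws ≠ []) :
    PySem.Chars.join [' '] (ws ++ List.replicate p []) =
      PySem.Chars.join [' '] ws ++ List.replicate p ' ' := by
  induction p with
  | zero => simp
  | succ q ih =>
    rw [List.replicate_succ', ← List.append_assoc,
      pv_join_append [' '] (ws ++ List.replicate q []) [[]] (by simp [h]) (by simp), ih]
    simp [List.replicate_succ', PySem.Chars.join_singleton]

-- STRIP
theorem pv_rstrip_pad (x : List Char) (p : Nat) :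
    PySem.Chars.rstrip (x ++ List.replicate p ' ') = PySem.Chars.rstrip x := by
  show (List.dropWhile _ _).reverse = _
  rw [List.reverse_append, List.reverse_replicate]
  have : ∀ z, List.dropWhile PySem.Chars.isspace (List.replicate p ' ' ++ z) =
      List.dropWhile PySem.Chars.isspace z := by
    intro z
    induction p with
    | zero => simp
    | succ q ih => simpa [List.replicate_succ, List.dropWhile_cons, show PySem.Chars.isspace ' ' = true from rfl] using ih
  rw [this]
  rfl

theorem pv_strip_pad (x : List Char) (p : Nat) :
    PySem.Chars.strip (x ++ List.replicate p ' ') = PySem.Chars.strip x := by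
  show PySem.Chars.rstrip (PySem.Chars.lstrip _) = PySem.Chars.rstrip (PySem.Chars.lstrip x)
  unfold PySem.Chars.lstrip
  rw [List.dropWhile_append]
  split
  · rename_i hemp
    rw [List.isEmpty_iff] at hemp
    rw [hemp]
    have : List.dropWhile PySem.Chars.isspace (List.replicate p ' ') = [] := by
      induction p with
      | zero => simp
      | succ q ih => simpa [List.replicate_succ, List.dropWhile_cons, show PySem.Chars.isspace ' ' = true from rfl] using ih
    rw [this]
  · exact pv_rstrip_pad _ p

-- L14 FLAT
theorem pv_flat (ws : List (List Char)) (Ln Cn : Nat) :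
    (pvGridOf ws Ln Cn).flatten = (List.range (Ln*Cn)).map (fun t => ws.getD t []) := by
  induction Ln with
  | zero => simp [pvGridOf]
  | succ l ih =>
    rw [pvGridOf, List.range_succ, List.map_append, List.flatten_append]
    rw [show pvGridOf ws l Cn = (List.range l).map _ from rfl] at ih
    rw [ih, Nat.succ_mul, List.range_add, List.map_append]
    simp [List.map_map, Function.comp]

-- L1 grid row / get
theorem pv_grid_row (ws : List (List Char)) (Ln Cn i : Nat) (hi : i < Ln) :
    PySem.List.pyGetD (pvGridOf ws Ln Cn) (i : Int) [] =
      (List.range Cn).map (fun j => ws.getD (i*Cn+j) []) := by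
  rw [PySem.List.pyGetD_natCast]
  rw [List.getD_eq_getElem _ _ (by simpa [pvGridOf] using hi)]
  simp [pvGridOf]

theorem pv_grid_get (ws : List (List Char)) (Ln Cn i j : Nat) (hi : i < Ln) (hj : j < Cn) :
    PySem.List.pyGetD (PySem.List.pyGetD (pvGridOf ws Ln Cn) (i : Int) []) (j : Int) [] =
      ws.getD (i*Cn+j) [] := by
  rw [pv_grid_row ws Ln Cn i hi, PySem.List.pyGetD_natCast]
  rw [List.getD_eq_getElem _ _ (by simpa using hj)]
  simp

-- L2 GRIDSET
theorem pv_grid_set (ws : List (List Char)) (Ln Cn i j : Nat) (v : List Char)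
    (hi : i < Ln) (hj : j < Cn) (ht : i*Cn+j < ws.length) :
    (pvGridOf ws Ln Cn).set i (((List.range Cn).map (fun j' => ws.getD (i*Cn+j') [])).set j v) =
      pvGridOf (ws.set (i*Cn+j) v) Ln Cn := by
  apply List.ext_getElem
  · simp [pvGridOf]
  · intro i' h1 h2
    have hi' : i' < Ln := by simpa [pvGridOf] using h2
    by_cases hii : i' = i
    · subst hii
      rw [List.getElem_set_self (by simpa [pvGridOf] using hi')]
      simp only [pvGridOf, List.getElem_map, List.getElem_range]
      apply List.ext_getElem
      · simp
      · intro j' g1 g2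
        have hj' : j' < Cn := by simpa using g2
        by_cases hjj : j' = j
        · subst hjj
          rw [List.getElem_set_self (by simpa using hj')]
          rw [List.getElem_map, List.getElem_range,
            List.getD_eq_getElem _ _ (by simpa using ht)]
          simp
        · rw [List.getElem_set_ne (by omega)]
          simp only [List.getElem_map, List.getElem_range]
          have hne : i'*Cn+j' ≠ i'*Cn+j := by omega
          by_cases hb : i'*Cn+j' < ws.length
          · rw [List.getD_eq_getElem _ _ hb, List.getD_eq_getElem _ _ (by simpa using hb),
              List.getElem_set_ne (by omega)]
          · rw [List.getD_eq_default _ _ (by omega), List.getD_eq_default _ _ (by simpa using (by omega : ws.length ≤ i'*Cn+j'))]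
    · rw [List.getElem_set_ne (by omega)]
      simp only [pvGridOf, List.getElem_map, List.getElem_range]
      apply List.map_congr_left
      intro j' hj'
      have hj'' : j' < Cn := List.mem_range.mp hj'
      have hne : i'*Cn+j' ≠ i*Cn+j := by
        intro hcontra
        exact hii ((pv_idx_inj hj'' hj hcontra).1)
      by_cases hb : i'*Cn+j' < ws.length
      · rw [List.getD_eq_getElem _ _ hb, List.getD_eq_getElem _ _ (by simpa using hb),
          List.getElem_set_ne (by omega)]
      · rw [List.getD_eq_default _ _ (by omega), List.getD_eq_default _ _ (by simpa using (by omega : ws.length ≤ i'*Cn+j'))]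


-- NEST2FLAT
theorem pv_nest {α β γ : Type} (f : α → β × γ → α) :
    ∀ (cols : List γ) (rows : List β) (st : α),
    cols.foldl (fun st j => rows.foldl (fun st2 i => f st2 (i,j)) st) st =
      (cols.flatMap (fun j => rows.map (fun i => (i,j)))).foldl f st := by
  intro cols
  induction cols with
  | nil => intro rows st; rfl
  | cons c cols ih =>
    intro rows st
    simp only [List.flatMap_cons, List.foldl_append, List.foldl_cons, List.foldl_map]
    exact ih rows _

-- AEMB
theorem pv_aemb (sec : List Char) (Ln Cn : Nat) :
    ∀ (P : List (Nat × Nat)) (ws : List (List Char)) (k : Int),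
    (∀ p ∈ P, p.1 < Ln ∧ p.2 < Cn) →
    P.foldl (pvGStep sec) (pvGridOf ws Ln Cn, k) =
      (pvGridOf ((P.map (fun p => p.1*Cn+p.2)).foldl (pvWStep sec) (ws, k)).1 Ln Cn,
       ((P.map (fun p => p.1*Cn+p.2)).foldl (pvWStep sec) (ws, k)).2) := by
  intro P
  induction P with
  | nil => intro ws k hP; rfl
  | cons p P ih =>
    intro ws k hP
    obtain ⟨hi, hj⟩ := hP p (by simp)
    have hcell := pv_grid_get ws Ln Cn p.1 p.2 hi hj
    simp only [List.foldl_cons, List.map_cons, pvGStep, pvWStep, hcell]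
    by_cases hcond : k < (sec.length : Int) ∧ ws.getD (p.1*Cn+p.2) [] ≠ []
    · rw [if_pos hcond, if_pos hcond]
      have ht : p.1*Cn+p.2 < ws.length := by
        by_contra hge
        exact hcond.2 (List.getD_eq_default _ _ (by omega))
      have hset : pvSet2 (pvGridOf ws Ln Cn) (p.1:Int) (p.2:Int) (pvEmb sec k (ws.getD (p.1*Cn+p.2) [])) =
          pvGridOf (ws.set (p.1*Cn+p.2) (pvEmb sec k (ws.getD (p.1*Cn+p.2) []))) Ln Cn := by
        unfold pvSet2
        rw [pv_grid_row ws Ln Cn p.1 hi]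
        simp only [Int.toNat_natCast]
        exact pv_grid_set ws Ln Cn p.1 p.2 _ hi hj ht
      rw [hset]
      exact ih _ _ (fun q hq => hP q (by simp [hq]))
    · rw [if_neg hcond, if_neg hcond]
      exact ih _ _ (fun q hq => hP q (by simp [hq]))

-- WFILT
theorem pv_wfilt (sec : List Char) (n : Nat) :
    ∀ (l : List Nat) (ws : List (List Char)) (k : Int), ws.length = n → (∀ w ∈ ws, w ≠ []) →
    l.foldl (pvWStep sec) (ws, k) = (l.filter (fun t => decide (t < n))).foldl (pvWStep sec) (ws, k) := by
  intro l
  induction l with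
  | nil => intros; rfl
  | cons t l ih =>
    intro ws k hlen hne
    by_cases ht : t < n
    · rw [List.filter_cons_of_pos (by simpa using ht)]
      simp only [List.foldl_cons]
      rcases hst : pvWStep sec (ws, k) t with ⟨ws', k'⟩
      have hws' : ws'.length = n ∧ ∀ w ∈ ws', w ≠ [] := by
        unfold pvWStep at hst
        split at hst
        · cases hst
          constructor
          · simpa using hlen
          · intro w hw
            rcases List.mem_or_eq_of_mem_set hw with h | h
            · exact hne w h
            · subst h; simp [pvEmb]
        · cases hst; exact ⟨hlen, hne⟩
      exact ih ws' k' hws'.1 hws'.2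
    · rw [List.filter_cons_of_neg (by simpa using ht)]
      have hid : pvWStep sec (ws, k) t = (ws, k) := by
        unfold pvWStep
        rw [if_neg]
        rintro ⟨-, hgd⟩
        exact hgd (List.getD_eq_default _ _ (by simpa using (by omega : ws.length ≤ t)))
      simp only [List.foldl_cons, hid]
      exact ih ws k hlen hne

-- WIDLE
theorem pv_widle (sec : List Char) :
    ∀ (l : List Nat) (ws : List (List Char)) (k : Int), (sec.length : Int) ≤ k →
    l.foldl (pvWStep sec) (ws, k) = (ws, k) := by
  intro l
  induction l with
  | nil => intros; rfl
  | cons t l ih =>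
    intro ws k hk
    have hid : pvWStep sec (ws, k) t = (ws, k) := by
      unfold pvWStep
      rw [if_neg]
      rintro ⟨hlt, -⟩
      omega
    simp only [List.foldl_cons, hid]
    exact ih ws k hk

-- WRUN
theorem pv_wrun (sec : List Char) :
    ∀ (l : List Nat) (ws : List (List Char)) (k : Nat),
    (∀ t ∈ l, t < ws.length) → (∀ w ∈ ws, w ≠ []) →
    (l.foldl (pvWStep sec) (ws, (k:Int))).1 = pvRun sec (l.take (sec.length - k)) k ws := by
  intro l
  induction l with
  | nil => intros; simp [pvRun]
  | cons t l ih =>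
    intro ws k hlt hne
    by_cases hk : k < sec.length
    · have hcond : (k:Int) < (sec.length : Int) ∧ ws.getD t [] ≠ [] := by
        refine ⟨by exact_mod_cast hk, ?_⟩
        have htw : t < ws.length := hlt t (by simp)
        rw [List.getD_eq_getElem _ _ htw]
        exact hne _ (List.getElem_mem htw)
      have hstep : pvWStep sec (ws, (k:Int)) t =
          (ws.set t (pvEmb sec (k:Int) (ws.getD t [])), ((k+1 : Nat) : Int)) := by
        unfold pvWStep
        rw [if_pos hcond]
        simp
      rw [show sec.length - k = (sec.length - (k+1)) + 1 by omega, List.take_succ_cons,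
        pvRun, List.foldl_cons, hstep]
      exact ih _ (k+1) (by intro t' ht'; simpa using hlt t' (by simp [ht'])) (by
        intro w hw
        rcases List.mem_or_eq_of_mem_set hw with h | h
        · exact hne w h
        · subst h; simp [pvEmb])
    · rw [show sec.length - k = 0 by omega, List.take_zero]
      have hid : pvWStep sec (ws, (k:Int)) t = (ws, (k:Int)) := by
        unfold pvWStep
        rw [if_neg]
        rintro ⟨hltk, -⟩
        have : k < sec.length := by exact_mod_cast (by simpa using hltk : (k:Int) < (sec.length:Int))
        omega
      rw [pvRun, List.foldl_cons, hid, pv_widle sec l ws (k:Int) (by exact_mod_cast (by omega : sec.length ≤ k))]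

-- LENRUN
theorem pv_runlen (sec : List Char) :
    ∀ (V : List Nat) (k : Nat) (ws : List (List Char)), (pvRun sec V k ws).length = ws.length := by
  intro V
  induction V with
  | nil => intros; rfl
  | cons t V ih => intro k ws; rw [pvRun, ih]; simp

-- BEMB
theorem pv_bemb (sec : List Char) :
    ∀ (V : List Nat) (k : Nat) (ws : List (List Char)),
    (PySem.List.enumerate (V.map (fun (t : Nat) => (t : Int))) (k:Int)).foldl
      (fun ws p => pvSet1 ws p.2 (pvEmb sec p.1 (PySem.List.pyGetD ws p.2 []))) ws
    = pvRun sec V k ws := by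
  intro V
  induction V with
  | nil => intros; rfl
  | cons t V ih =>
    intro k ws
    rw [List.map_cons, PySem.List.enumerate_cons, List.foldl_cons, pvRun]
    have : (pvSet1 ws (t:Int) (pvEmb sec (k:Int) (PySem.List.pyGetD ws (t:Int) []))) =
        ws.set t (pvEmb sec (k:Int) (ws.getD t [])) := by
      unfold pvSet1
      rw [PySem.List.pyGetD_natCast, Int.toNat_natCast]
    rw [this, show ((k:Int) + 1) = ((k+1 : Nat) : Int) by push_cast; ring]
    exact ih (k+1) _

-- FILL SHIFT
theorem pv_fill_shift (ms : List (List Char)) :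
    ∀ (js : List Nat) (x : List Char) (xs : List (List Char)) (m : Nat),
    pvFill ms (js.map (·+1)) (x :: xs) m =
      ((x :: (pvFill ms js xs m).1), (pvFill ms js xs m).2) := by
  intro js
  induction js with
  | nil => intros; rfl
  | cons j js ih =>
    intro x xs m
    simp only [List.map_cons, pvFill]
    by_cases hm : m < ms.length
    · rw [if_pos hm, if_pos hm, List.set_cons_succ]
      exact ih x _ (m+1)
    · rw [if_neg hm, if_neg hm]

-- MAINROW
theorem pv_fill_row (ms : List (List Char)) :
    ∀ (c m : Nat), m ≤ ms.length →
    pvFill ms (List.range c) (List.replicate c []) m =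
      ((List.range c).map (fun j => ms.getD (m+j) []), min ms.length (m+c)) := by
  intro c
  induction c with
  | zero => intro m hm; simp [pvFill.eq_def]; omega
  | succ c ih =>
    intro m hm
    rw [List.range_succ_eq_map, List.replicate_succ]
    by_cases hmn : m < ms.length
    · rw [pvFill, if_pos hmn, List.set_cons_zero, pv_fill_shift, ih (m+1) (by omega)]
      simp only [Prod.mk.injEq, List.map_cons, List.map_map, Nat.add_zero]
      refine ⟨?_, by omega⟩
      congr 1
      apply List.map_congr_left
      intro j hj
      simp only [Function.comp, Nat.succ_eq_add_one]
      congr 1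
      omega
    · rw [pvFill, if_neg hmn]
      have hm' : m = ms.length := by omega
      simp only [Prod.mk.injEq]
      refine ⟨?_, by omega⟩
      have hconst : ∀ j ∈ (0 :: (List.range c).map Nat.succ), ms.getD (m+j) [] = ([]:List Char) :=
        fun j hj => List.getD_eq_default _ _ (by omega)
      rw [List.map_congr_left hconst, List.map_const']
      simp [List.replicate_succ]

theorem pv_fill_idle (ms : List (List Char)) :
    ∀ (l : List Int) (row : List (List Char)) (idx : Int), ¬ idx < (ms.length:Int) →
    l.foldl (fun st j => if st.2 < (ms.length:Int) then
        (st.1.set j.toNat (PySem.List.pyGetD ms st.2 []), st.2+1) else st) (row, idx) = (row, idx) := by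
  intro l
  induction l with
  | nil => intros; rfl
  | cons j l ih =>
    intro row idx hidx
    simp only [List.foldl_cons]
    rw [if_neg hidx]
    exact ih row idx hidx

-- FILLCONV: the Int row fold is pvFill
theorem pv_fill_conv (ms : List (List Char)) :
    ∀ (js : List Nat) (row : List (List Char)) (m : Nat),
    (js.map (fun (t : Nat) => (t:Int))).foldl
      (fun st j => if st.2 < (ms.length:Int) then
          (st.1.set j.toNat (PySem.List.pyGetD ms st.2 []), st.2+1) else st) (row, (m:Int))
    = ((pvFill ms js row m).1, ((pvFill ms js row m).2 : Int)) := by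
  intro js
  induction js with
  | nil => intros; rfl
  | cons j js ih =>
    intro row m
    simp only [List.map_cons, List.foldl_cons, pvFill]
    by_cases hm : m < ms.length
    · rw [if_pos (by exact_mod_cast hm), if_pos hm, PySem.List.pyGetD_natCast, Int.toNat_natCast,
        show ((m:Int) + 1) = ((m+1 : Nat) : Int) by push_cast; ring]
      exact ih _ (m+1)
    · rw [if_neg (by exact_mod_cast hm), if_neg hm]
      exact pv_fill_idle ms (js.map (fun (t:Nat) => (t:Int))) row (m:Int) (by exact_mod_cast hm)

-- INNER: the tableau fold only touches row i
theorem pv_inner (ms : List (List Char)) :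
    ∀ (l : List Int) (tab : List (List (List Char))) (idx : Int) (i : Nat) (_hi : i < tab.length),
    l.foldl (fun st j => if st.2 < (ms.length:Int) then
        (pvSet2 st.1 (i:Int) j (PySem.List.pyGetD ms st.2 []), st.2+1) else st) (tab, idx)
    = (tab.set i (l.foldl (fun st j => if st.2 < (ms.length:Int) then
        (st.1.set j.toNat (PySem.List.pyGetD ms st.2 []), st.2+1) else st) (tab.getD i [], idx)).1,
       (l.foldl (fun st j => if st.2 < (ms.length:Int) then
        (st.1.set j.toNat (PySem.List.pyGetD ms st.2 []), st.2+1) else st) (tab.getD i [], idx)).2) := by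
  intro l
  induction l with
  | nil =>
    intro tab idx i hi
    simp only [List.foldl_nil]
    rw [List.getD_eq_getElem _ _ hi, List.set_getElem_self]
  | cons j l ih =>
    intro tab idx i hi
    simp only [List.foldl_cons]
    by_cases hidx : idx < (ms.length : Int)
    · rw [if_pos hidx, if_pos hidx]
      have hset2 : pvSet2 tab (i:Int) j (PySem.List.pyGetD ms idx []) =
          tab.set i ((tab.getD i []).set j.toNat (PySem.List.pyGetD ms idx [])) := by
        unfold pvSet2
        rw [Int.toNat_natCast, PySem.List.pyGetD_natCast]
      rw [hset2, ih _ _ i (by simpa using hi)]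
      have hg : (tab.set i ((tab.getD i []).set j.toNat (PySem.List.pyGetD ms idx []))).getD i []
          = (tab.getD i []).set j.toNat (PySem.List.pyGetD ms idx []) := by
        rw [List.getD_eq_getElem _ _ (by simpa using hi)]
        simp
      rw [hg, List.set_set]
    · rw [if_neg hidx, if_neg hidx]
      exact ih tab idx i hi

-- OUTER
theorem pv_outer (ms : List (List Char)) (Cn Ln : Nat) :
    ∀ (l : Nat), l ≤ Ln →
    ((List.range l).map (fun (t : Nat) => (t:Int))).foldl
      (fun st i => (PySem.List.pyRange 0 (Cn:Int) 1).foldl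
        (fun st j => if st.2 < (ms.length:Int) then
            (pvSet2 st.1 i j (PySem.List.pyGetD ms st.2 []), st.2+1) else st) st)
      (List.replicate Ln (List.replicate Cn []), (0:Int))
    = (pvPartial ms Ln Cn l, ((min ms.length (l*Cn) : Nat) : Int)) := by
  intro l
  induction l with
  | zero =>
    intro _
    simp only [List.range_zero, List.map_nil, List.foldl_nil, Prod.mk.injEq]
    refine ⟨?_, by simp⟩
    · unfold pvPartial
      rw [show ((List.range Ln).map (fun i =>
          if i < 0 then (List.range Cn).map (fun j => ms.getD (i*Cn+j) []) else List.replicate Cn ([]:List Char)))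
        = (List.range Ln).map (fun _ => List.replicate Cn ([]:List Char)) from
          List.map_congr_left (fun i _ => by simp)]
      rw [List.map_const', List.length_range]
  | succ l ih =>
    intro hl
    rw [List.range_succ, List.map_append, List.foldl_append, ih (by omega)]
    simp only [List.map_cons, List.map_nil, List.foldl_cons, List.foldl_nil]
    rw [pv_inner ms _ _ _ l (by simp [pvPartial]; omega)]
    have hrowl : (pvPartial ms Ln Cn l).getD l [] = List.replicate Cn [] := by
      rw [List.getD_eq_getElem _ _ (by simp [pvPartial]; omega)]
      simp [pvPartial]
    rw [hrowl]
    rw [PySem.List.pyRange_zero_natCast, pv_fill_conv,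
      pv_fill_row ms Cn (min ms.length (l*Cn)) (by omega)]
    have harith : min ms.length (min ms.length (l*Cn) + Cn) = min ms.length ((l+1)*Cn) := by
      have h1 : (l+1)*Cn = l*Cn + Cn := by ring
      omega
    simp only [Prod.mk.injEq]
    refine ⟨?_, by simp only [harith]⟩
    · apply List.ext_getElem
      · simp [pvPartial]
      · intro i' h1 h2
        have hi' : i' < Ln := by simpa [pvPartial] using h2
        by_cases hil : i' = l
        · subst hil
          rw [List.getElem_set_self (by simpa [pvPartial] using hi')]
          simp only [pvPartial, List.getElem_map, List.getElem_range, if_pos (by omega : i' < i'+1)]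
          apply List.map_congr_left
          intro j hj
          by_cases hc : i'*Cn ≤ ms.length
          · rw [Nat.min_eq_right hc]
          · rw [List.getD_eq_default _ _ (by omega), List.getD_eq_default _ _ (by
              have : i'*Cn ≥ ms.length := by omega
              omega)]
        · rw [List.getElem_set_ne (by omega)]
          simp only [pvPartial, List.getElem_map, List.getElem_range]
          by_cases hlt : i' < l
          · rw [if_pos hlt, if_pos (by omega)]
          · rw [if_neg hlt, if_neg (by omega)]

-- T
theorem pv_ttt (ms : List (List Char)) (Cn Ln : Nat) :
    text_to_tab ms (Cn:Int) (Ln:Int) = pvGridOf ms Ln Cn := by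
  unfold text_to_tab
  simp only [Int.toNat_natCast]
  rw [PySem.List.pyRange_zero_natCast (n := Ln), pv_outer ms Cn Ln Ln le_rfl]
  unfold pvPartial pvGridOf
  apply List.map_congr_left
  intro i hi
  rw [if_pos (List.mem_range.mp hi)]

-- new: corollaries
theorem pv_wrun0 (sec : List Char) (ms : List (List Char)) (l : List Nat)
    (hlt : ∀ t ∈ l, t < ms.length) (hne : ∀ w ∈ ms, w ≠ []) :
    (l.foldl (pvWStep sec) (ms, (0:Int))).1 = pvRun sec (l.take sec.length) 0 ms := by
  have h := pv_wrun sec l ms 0 hlt hne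
  simpa using h

theorem pv_bemb0 (sec : List Char) (V : List Nat) (ws : List (List Char)) :
    (PySem.List.enumerate (V.map (fun (t : Nat) => (t:Int))) 0).foldl
      (fun ws p => pvSet1 ws p.2
        (PySem.List.pyGetD sec p.1 ' ' :: '\u200B' ::
          PySem.List.slice (PySem.List.pyGetD ws p.2 []) (some 1) none)) ws
    = pvRun sec V 0 ws := by
  have h := pv_bemb sec V 0 ws
  simpa [pvEmb] using h

-- body reshaping (definitional)
theorem pv_body_eq (sec : List Char) (Ln : Nat) :
    (fun (st : List (List (List Char)) × Int) (j : Nat) =>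
      List.foldl (fun (st2 : List (List (List Char)) × Int) (i : Nat) =>
        if st2.2 < (sec.length : Int) ∧
            PySem.List.pyGetD (PySem.List.pyGetD st2.1 (i:Int) []) (j:Int) [] ≠ [] then
          (pvSet2 st2.1 (i:Int) (j:Int)
            (PySem.List.pyGetD sec st2.2 ' ' :: '\u200B' ::
              PySem.List.slice (PySem.List.pyGetD (PySem.List.pyGetD st2.1 (i:Int) []) (j:Int) []) (some 1) none),
           st2.2 + 1)
        else st2) st (List.range Ln))
    = (fun st j => List.foldl (fun st2 i => pvGStep sec st2 (i,j)) st (List.range Ln)) := rfl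

-- A-side evaluation
theorem pv_A_eval (sec : List Char) (ms : List (List Char)) (Cn Ln : Nat)
    (hC : 0 < Cn) (_hL : 0 < Ln) (hn : 0 < ms.length) (hnle : ms.length ≤ Ln*Cn)
    (hw : ∀ w ∈ ms, w ≠ []) :
    PySem.Chars.strip (PySem.Chars.join [' ']
      ((((PySem.List.pyRange 0 (Cn:Int) 1).foldl (fun st j =>
          (PySem.List.pyRange 0 (Ln:Int) 1).foldl (fun st i =>
            if st.2 < (sec.length : Int) ∧
                PySem.List.pyGetD (PySem.List.pyGetD st.1 i []) j [] ≠ [] then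
              (pvSet2 st.1 i j
                (PySem.List.pyGetD sec st.2 ' ' :: '\u200B' ::
                  PySem.List.slice (PySem.List.pyGetD (PySem.List.pyGetD st.1 i []) j []) (some 1) none),
               st.2 + 1)
            else st) st) (text_to_tab ms (Cn:Int) (Ln:Int), (0:Int))).1).map
        (fun ligne => PySem.Chars.join [' '] ligne)))
    = PySem.Chars.strip (PySem.Chars.join [' '] (pvRun sec (pvOrd sec ms Cn Ln) 0 ms)) := by
  rw [pv_ttt]
  simp only [PySem.List.pyRange_zero_natCast, List.foldl_map]
  rw [pv_body_eq sec Ln]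
  rw [pv_nest (pvGStep sec) (List.range Cn) (List.range Ln) (pvGridOf ms Ln Cn, (0:Int))]
  rw [pv_aemb sec Ln Cn _ ms 0 (by
    intro p hp
    simp only [List.mem_flatMap, List.mem_map, List.mem_range] at hp
    obtain ⟨j, hj, i, hi, rfl⟩ := hp
    exact ⟨hi, hj⟩)]
  simp only [List.map_flatMap, List.map_map, Function.comp_def]
  rw [pv_wfilt sec ms.length _ ms 0 rfl hw]
  rw [pv_wrun0 sec ms _ (by
    intro t ht
    simp only [List.mem_filter, decide_eq_true_eq] at ht
    exact ht.2) hw]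
  have hrows : ∀ r ∈ pvGridOf (pvRun sec ((((List.range Cn).flatMap
      (fun j => (List.range Ln).map (fun i => i*Cn+j))).filter
      (fun t => decide (t < ms.length))).take sec.length) 0 ms) Ln Cn, r ≠ [] := by
    intro r hr
    simp only [pvGridOf, List.mem_map, List.mem_range] at hr
    obtain ⟨i, hi, rfl⟩ := hr
    simp only [ne_eq, List.map_eq_nil_iff, List.range_eq_nil]
    omega
  rw [pv_join_rows [' '] _ hrows, pv_flat]
  have hlen : (pvRun sec ((((List.range Cn).flatMap
      (fun j => (List.range Ln).map (fun i => i*Cn+j))).filter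
      (fun t => decide (t < ms.length))).take sec.length) 0 ms).length = ms.length :=
    pv_runlen sec _ 0 ms
  rw [pv_pad _ (Ln*Cn) (by rw [hlen]; exact hnle)]
  rw [pv_join_pad _ _ (by
    intro hnil
    have := hlen
    rw [hnil] at this
    simp at this
    omega)]
  rw [pv_strip_pad]
  rfl

-- only the first min(Cn, n) columns contain valid cells
theorem pv_ord_trunc (sec : List Char) (ms : List (List Char)) (Cn Ln : Nat) :
    (List.range (min Cn ms.length)).flatMap (fun j =>
      ((List.range Ln).map (fun i => i*Cn+j)).filter (fun t => decide (t < ms.length)))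
    = (List.range Cn).flatMap (fun j =>
      ((List.range Ln).map (fun i => i*Cn+j)).filter (fun t => decide (t < ms.length))) := by
  by_cases hc : Cn ≤ ms.length
  · rw [Nat.min_eq_left hc]
  · rw [Nat.min_eq_right (by omega)]
    have hsplit : List.range Cn = List.range ms.length ++ (List.range (Cn - ms.length)).map (ms.length + ·) := by
      rw [← List.range_add]
      congr 1
      omega
    have hnil : ((List.range (Cn - ms.length)).map (ms.length + ·)).flatMap (fun j =>
        ((List.range Ln).map (fun i => i*Cn+j)).filter (fun t => decide (t < ms.length))) = [] := by
      rw [List.flatMap_map]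
      apply List.flatMap_eq_nil_iff.mpr
      intro j hj
      apply List.filter_eq_nil_iff.mpr
      intro t ht
      simp only [List.mem_map, List.mem_range] at ht
      obtain ⟨i, _, rfl⟩ := ht
      simp only [decide_eq_true_eq, not_lt]
      omega
    rw [hsplit, List.flatMap_append, hnil, List.append_nil]

-- B-side evaluation
theorem pv_B_eval (sec : List Char) (ms : List (List Char)) (Cn Ln : Nat) :
    PySem.Chars.join [' ']
      ((PySem.List.enumerate (PySem.List.slice
          ((PySem.List.pyRange 0 (min (Cn:Int) (ms.length:Int)) 1).flatMap (fun j =>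
            ((PySem.List.pyRange 0 (Ln:Int) 1).map (fun i => i * (Cn:Int) + j)).filter
              (fun idx => decide (idx < (ms.length:Int)))))
          none (some (sec.length : Int))) 0).foldl
        (fun ws p => pvSet1 ws p.2
          (PySem.List.pyGetD sec p.1 ' ' :: '\u200B' ::
            PySem.List.slice (PySem.List.pyGetD ws p.2 []) (some 1) none)) ms)
    = PySem.Chars.join [' '] (pvRun sec (pvOrd sec ms Cn Ln) 0 ms) := by
  rw [show (min (Cn:Int) (ms.length:Int)) = ((min Cn ms.length : Nat) : Int) by
    rw [Nat.cast_min]]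
  simp only [PySem.List.pyRange_zero_natCast, List.flatMap_map, List.map_map]
  have hmap : ∀ (j : Nat),
      (((List.range Ln).map ((fun i => i * (Cn:Int) + (j:Int)) ∘ (fun (t:Nat) => (t:Int)))).filter
        (fun idx => decide (idx < (ms.length:Int))))
      = (((List.range Ln).map (fun i => i*Cn+j)).filter (fun t => decide (t < ms.length))).map
          (fun (t:Nat) => (t:Int)) := by
    intro j
    have h1 : (List.range Ln).map ((fun i => i * (Cn:Int) + (j:Int)) ∘ (fun (t:Nat) => (t:Int)))
        = ((List.range Ln).map (fun i => i*Cn+j)).map (fun (t:Nat) => (t:Int)) := by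
      rw [List.map_map]
      apply List.map_congr_left
      intro i _
      simp only [Function.comp_apply]
      push_cast
      ring
    rw [h1, List.filter_map]
    congr 1
    apply List.filter_congr
    intro t _
    simp
  simp only [hmap]
  rw [← List.map_flatMap, PySem.List.slice_to_natCast, ← List.map_take, pv_bemb0,
    pv_ord_trunc sec ms Cn Ln, ← List.filter_flatMap]
  rfl

theorem pv_A_deg (sec : List Char) (ms : List (List Char)) (C L : Int) (hL : L ≤ 0) :
    (((PySem.List.pyRange 0 C 1).foldl (fun st j =>
        (PySem.List.pyRange 0 L 1).foldl (fun st i =>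
          if st.2 < (sec.length : Int) ∧
              PySem.List.pyGetD (PySem.List.pyGetD st.1 i []) j [] ≠ [] then
            (pvSet2 st.1 i j
              (PySem.List.pyGetD sec st.2 ' ' :: '\u200B' ::
                PySem.List.slice (PySem.List.pyGetD (PySem.List.pyGetD st.1 i []) j []) (some 1) none),
             st.2 + 1)
          else st) st) (text_to_tab ms C L, (0:Int))).1) = [] := by
  have hnil : PySem.List.pyRange 0 L 1 = [] := PySem.List.pyRange_one_eq_nil hL
  simp only [hnil, List.foldl_nil]
  rw [PySem.List.foldl_ignore]
  unfold text_to_tab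
  simp only [hnil, List.foldl_nil]
  simp [Int.toNat_of_nonpos hL]

theorem pv_main_eq (secret text : String) (C : Int) (hpre : C ≠ 0) :
    steg_colonne secret text C = steg_colonne_alt secret text C := by
  simp only [steg_colonne, steg_colonne_alt]
  set sec := secret.toList with hsec
  set ms := PySem.Chars.split₀ text.toList with hms
  set L := -(PySem.Int.floordiv (-(ms.length : Int)) C) with hLdef
  have herr : (if ms.length < sec.length then pvErr else "") =
      (if (ms.length : Int) < (sec.length : Int) then pvErr else "") := by
    by_cases he : ms.length < sec.length
    · rw [if_pos he, if_pos (by exact_mod_cast he)]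
    · rw [if_neg he, if_neg (by exact_mod_cast he)]
  by_cases hL : L ≤ 0
  · rw [if_pos hL, pv_A_deg sec ms C L hL]
    simp only [List.map_nil]
    rw [show PySem.Chars.join [' '] [] = [] from rfl]
    rw [show PySem.Chars.strip [] = [] from rfl]
    simp only [Prod.mk.injEq]
    exact ⟨trivial, herr⟩
  · rw [not_le] at hL
    have hC : 0 < C := by
      rcases lt_trichotomy C 0 with h | h | h
      · exfalso
        have h2 : 0 ≤ PySem.Int.floordiv (-(ms.length : Int)) C :=
          Int.fdiv_nonneg_of_nonpos_of_nonpos (by simp) (le_of_lt h)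
        omega
      · exact absurd h hpre
      · exact h
    obtain ⟨hb1, hb2⟩ := (PySem.Int.neg_floordiv_neg_eq_iff_of_pos hC).mp hLdef.symm
    set Cn := C.toNat with hCn
    set Ln := L.toNat with hLn
    have hCC : C = (Cn : Int) := by rw [hCn, Int.toNat_of_nonneg hC.le]
    have hLL : L = (Ln : Int) := by rw [hLn, Int.toNat_of_nonneg hL.le]
    have hCpos : 0 < Cn := by omega
    have hLpos : 0 < Ln := by omega
    have hn : 0 < ms.length := by
      rcases Nat.eq_zero_or_pos ms.length with h0 | h0
      · exfalso
        have hz : L = 0 := by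
          rw [hLdef, h0]
          simp [PySem.Int.floordiv]
        omega
      · exact h0
    have hnle : ms.length ≤ Ln * Cn := by
      have h2 := hb2
      rw [hCC, hLL] at h2
      exact_mod_cast h2
    have hw : ∀ w ∈ ms, w ≠ [] := fun w hw => pv_split₀_ne_nil text.toList w (hms ▸ hw)
    rw [hCC, hLL]
    rw [if_neg (by omega : ¬ ((Ln : Int) ≤ 0))]
    simp only [Prod.mk.injEq]
    exact ⟨congrArg String.ofList
      ((pv_A_eval sec ms Cn Ln hCpos hLpos hn hnle hw).trans
        (congrArg PySem.Chars.strip (pv_B_eval sec ms Cn Ln)).symm), herr⟩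

-- ===== VERDICT (by name: the statement is the Claim_ definition above) =====
theorem steg_colonne_spec : Claim_equal_steg_colonne := by
  intro secret text nb_colonnes _hdom hpre
  unfold Spec_steg_colonne
  exact pv_main_eq secret text nb_colonnes hpre
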